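-- pv_equiv track=rewrite | github.com/MatejaDjokic/determinant-calculator | src/advanced_determinant2.py | condense_and_separate
-- ===== SOURCE A (Python) =====
-- def condense_and_separate(input: str):
--     num = ""
--     param_data = (None, 0)
--     for s in input:
--         if s.isdigit():
--             num += s
--         else:
--             if param_data[0] is None:
--                 param_data = (s, 1)
--             else:
--                 count = param_data[1]
--                 param_data = (param_data[0], count + 1)
--
--     n = "1"
--     if num != "":
--         n = num
--     return (int(n), param_data[0], param_data[1])
-- ===== SOURCE B (Python) =====
-- def condense_and_separate(input: str):
--     def solve(lo, hi):
--         # (digit substring, first non-digit or None, non-digit count) of input[lo:hi]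
--         if hi - lo == 0:
--             return ("", None, 0)
--         if hi - lo == 1:
--             c = input[lo]
--             if c.isdigit():
--                 return (c, None, 0)
--             return ("", c, 1)
--         mid = (lo + hi) // 2
--         dl, fl, cl = solve(lo, mid)
--         dr, fr, cr = solve(mid, hi)
--         return (dl + dr, fl if fl is not None else fr, cl + cr)
--
--     digits, first, count = solve(0, len(input))
--     return (int(digits) if digits else 1, first, count)
-- ===== Notes on version B (the rewrite author's own statement) =====
-- stated objective: alternative
-- what changed: Replaces A's single stateful left-to-right accumulation pass with a divide-and-conquer recursion over index ranges whose halves are combined by a monoid merge (concatenate digit parts, keep the leftmost non-digit, add counts).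
import Mathlib
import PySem

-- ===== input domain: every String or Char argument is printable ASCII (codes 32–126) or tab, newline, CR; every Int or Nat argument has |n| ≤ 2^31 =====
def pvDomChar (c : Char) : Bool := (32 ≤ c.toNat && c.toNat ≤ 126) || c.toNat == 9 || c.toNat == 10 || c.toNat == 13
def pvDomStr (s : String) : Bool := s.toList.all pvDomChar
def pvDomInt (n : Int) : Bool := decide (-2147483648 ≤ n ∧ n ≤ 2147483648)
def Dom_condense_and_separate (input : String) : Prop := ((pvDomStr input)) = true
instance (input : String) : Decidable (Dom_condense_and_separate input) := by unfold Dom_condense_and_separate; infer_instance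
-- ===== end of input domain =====

-- B replaces A's single stateful left-to-right pass with a divide-and-conquer recursion over
-- index ranges combined by a monoid merge; same results, a different algorithm of similar cost.

-- ===== PORT A =====
-- loop body of A: state = (num, (first non-digit so far, its count))
def condAStep (st : List Char × Option Char × Int) (s : Char) : List Char × Option Char × Int :=
  if PySem.Chars.isdigit s then (st.1 ++ [s], st.2.1, st.2.2)
  else match st.2.1 with
    | none => (st.1, some s, 1)
    | some x => (st.1, some x, st.2.2 + 1)

def condense_and_separate (input : String) : Int × Option String × Int :=
  let st := input.toList.foldl condAStep ([], none, 0)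
  let n : List Char := if st.1 = [] then ['1'] else st.1
  -- int(n): n is a nonempty ASCII-digit string here, so Python's int() never raises; getD 0 is unreachable
  ((PySem.Int.ofChars? n).getD 0, st.2.1.map (fun c => String.ofList [c]), st.2.2)

-- ===== PORT B =====
-- Source B's solve(lo, hi): divide and conquer on the index range [lo, hi) of the input
def solveB (l : List Char) (lo hi : Nat) : List Char × Option Char × Int :=
  if hi - lo = 0 then ([], none, 0)
  else if hi - lo = 1 then
    -- input[lo]: in range on every call reachable from the entry call (lo < hi ≤ len)
    let c := l.getD lo ' '
    if PySem.Chars.isdigit c then ([c], none, 0) else ([], some c, 1)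
  else
    let mid := (lo + hi) / 2
    let L := solveB l lo mid
    let R := solveB l mid hi
    (L.1 ++ R.1, L.2.1.or R.2.1, L.2.2 + R.2.2)
termination_by hi - lo
decreasing_by
  · have h1 : lo + 2 ≤ hi := by omega
    have h2 : lo + 1 ≤ (lo + hi) / 2 := by
      rw [Nat.le_div_iff_mul_le (by omega)]; omega
    omega
  · have h1 : lo + 2 ≤ hi := by omega
    have h2 : (lo + hi) / 2 < hi := by
      rw [Nat.div_lt_iff_lt_mul (by omega)]; omega
    omega

def condense_and_separate_alt (input : String) : Int × Option String × Int :=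
  let r := solveB input.toList 0 input.toList.length
  (if r.1 = [] then 1 else (PySem.Int.ofChars? r.1).getD 0,
   r.2.1.map (fun c => String.ofList [c]), r.2.2)

-- ===== PRECONDITION & SPEC =====
def Spec_condense_and_separate (input : String) (out : Int × Option String × Int) : Prop := out = condense_and_separate_alt input
instance (input : String) (out : Int × Option String × Int) : Decidable (Spec_condense_and_separate input out) := by unfold Spec_condense_and_separate; infer_instance

-- ===== CLAIM =====
def Claim_equal_condense_and_separate : Prop := ∀ (input : String), Dom_condense_and_separate input → Spec_condense_and_separate input (condense_and_separate input)

-- ===== LEMMAS AND PROOFS =====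

-- A side: once the first non-digit is fixed, the fold appends digits and counts non-digits
lemma condA_fold_some (l acc : List Char) (x : Char) (k : Int) :
    l.foldl condAStep (acc, some x, k)
      = (acc ++ l.filter (fun c => PySem.Chars.isdigit c), some x,
         k + ((l.filter (fun c => ! PySem.Chars.isdigit c)).length : Int)) := by
  induction l generalizing acc k with
  | nil => simp
  | cons c l ih =>
    by_cases h : PySem.Chars.isdigit c = true
    · simp [condAStep, h, ih]
    · simp only [List.foldl_cons, condAStep, h]
      simp only [Bool.false_eq_true, if_false]
      rw [ih]
      simp [h]
      ring

-- A side: from the initial state, the fold computes the three filter-based quantities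
lemma condA_fold_none (l acc : List Char) :
    l.foldl condAStep (acc, none, 0)
      = (acc ++ l.filter (fun c => PySem.Chars.isdigit c),
         (l.filter (fun c => ! PySem.Chars.isdigit c)).head?,
         ((l.filter (fun c => ! PySem.Chars.isdigit c)).length : Int)) := by
  induction l generalizing acc with
  | nil => simp
  | cons c l ih =>
    by_cases h : PySem.Chars.isdigit c = true
    · simp [condAStep, h, ih]
    · simp only [List.foldl_cons, condAStep, h]
      simp only [Bool.false_eq_true, if_false]
      rw [condA_fold_some]
      simp [h]
      ring

-- B side: solveB on [lo, hi) computes the same three quantities of the segment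
lemma solveB_spec (l : List Char) (k lo hi : Nat) (hk : hi - lo = k) (hhi : hi ≤ l.length) :
    solveB l lo hi
      = (((l.drop lo).take (hi - lo)).filter (fun c => PySem.Chars.isdigit c),
         (((l.drop lo).take (hi - lo)).filter (fun c => ! PySem.Chars.isdigit c)).head?,
         ((((l.drop lo).take (hi - lo)).filter (fun c => ! PySem.Chars.isdigit c)).length : Int)) := by
  induction k using Nat.strong_induction_on generalizing lo hi with
  | _ k ih =>
    rw [solveB]
    by_cases h0 : hi - lo = 0
    · simp [h0]
    by_cases h1 : hi - lo = 1
    · have hlo : lo < l.length := by omega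
      have hseg : (l.drop lo).take 1 = [l[lo]] := by
        rw [List.take_one, List.head?_drop]
        simp [List.getElem?_eq_getElem hlo]
      have hget : l.getD lo ' ' = l[lo] := by simp [List.getD, List.getElem?_eq_getElem hlo]
      simp only [h1, hget]
      rw [hseg]
      by_cases h : PySem.Chars.isdigit l[lo] = true
      · simp [h]
      · simp [h]
    · have h2 : lo + 2 ≤ hi := by omega
      have hm1 : lo + 1 ≤ (lo + hi) / 2 := by
        rw [Nat.le_div_iff_mul_le (by omega)]; omega
      have hm2 : (lo + hi) / 2 < hi := by
        rw [Nat.div_lt_iff_lt_mul (by omega)]; omega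
      simp only [h0, h1, if_false]
      rw [ih ((lo + hi) / 2 - lo) (by omega) lo ((lo + hi) / 2) rfl (by omega),
          ih (hi - (lo + hi) / 2) (by omega) ((lo + hi) / 2) hi rfl hhi]
      have hseg : (l.drop lo).take (hi - lo)
          = (l.drop lo).take ((lo + hi) / 2 - lo) ++ (l.drop ((lo + hi) / 2)).take (hi - (lo + hi) / 2) := by
        have hd : l.drop ((lo + hi) / 2) = (l.drop lo).drop ((lo + hi) / 2 - lo) := by
          rw [List.drop_drop]; congr 1; omega
        rw [hd, ← List.take_add]
        congr 1; omega
      rw [hseg]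
      simp [List.filter_append, List.head?_append]

-- ===== VERDICT =====
theorem condense_and_separate_spec : Claim_equal_condense_and_separate := by
  intro input _
  unfold Spec_condense_and_separate condense_and_separate condense_and_separate_alt
  rw [condA_fold_none, solveB_spec input.toList input.toList.length 0 input.toList.length rfl (le_refl _)]
  simp only [List.nil_append, List.drop_zero, Nat.sub_zero, List.take_length]
  by_cases h : input.toList.filter (fun c => PySem.Chars.isdigit c) = []
  · simp [h]
    decide
  · simp [h]
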